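-- pv_equiv track=rewrite | github.com/cesaranogilbert/ai-agent-ecosystem | services/universal_intelligence_agent.py | _identify_universal_patterns
-- ===== SOURCE A (Python) =====
-- from typing import Dict, List, Any, Optional, Tuple
--
-- def _identify_universal_patterns(all_patterns: List[str]) -> List[str]:
--     """Identify patterns that appear across multiple scales"""
--     # Look for common themes in pattern descriptions
--     universal_themes = [
--         "optimization",
--         "information processing",
--         "self-organization",
--         "adaptation",
--         "feedback loops",
--         "emergence",
--         "network effects",
--         "hierarchical organization"
--     ]
--
--     universal_patterns = []
--     for theme in universal_themes:
--         matching_patterns = [p for p in all_patterns if theme.lower() in p.lower()]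
--         if len(matching_patterns) > 2:  # Appears in multiple scales
--             universal_patterns.append(f"Universal {theme} across scales")
--
--     return universal_patterns
-- ===== SOURCE B (Python) =====
-- def _identify_universal_patterns(all_patterns):
--     """Identify patterns that appear across multiple scales (single pass over the patterns)"""
--     universal_themes = [
--         "optimization",
--         "information processing",
--         "self-organization",
--         "adaptation",
--         "feedback loops",
--         "emergence",
--         "network effects",
--         "hierarchical organization"
--     ]
--     lowered = [t.lower() for t in universal_themes]
--     counts = [0] * len(universal_themes)
--     for p in all_patterns:
--         pl = p.lower()
--         counts = [c + 1 if tl in pl else c for tl, c in zip(lowered, counts)]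
--     return [f"Universal {t} across scales"
--             for t, c in zip(universal_themes, counts) if c > 2]
-- ===== Notes on version B (the rewrite author's own statement) =====
-- stated objective: alternative
-- what changed: B inverts the loop nesting: one pass over the patterns, lowercasing each pattern once and updating a per-theme count table, then emits themes whose count exceeds 2 in declared order, instead of A's eight separate filter scans each re-lowercasing every pattern.
import Mathlib
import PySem

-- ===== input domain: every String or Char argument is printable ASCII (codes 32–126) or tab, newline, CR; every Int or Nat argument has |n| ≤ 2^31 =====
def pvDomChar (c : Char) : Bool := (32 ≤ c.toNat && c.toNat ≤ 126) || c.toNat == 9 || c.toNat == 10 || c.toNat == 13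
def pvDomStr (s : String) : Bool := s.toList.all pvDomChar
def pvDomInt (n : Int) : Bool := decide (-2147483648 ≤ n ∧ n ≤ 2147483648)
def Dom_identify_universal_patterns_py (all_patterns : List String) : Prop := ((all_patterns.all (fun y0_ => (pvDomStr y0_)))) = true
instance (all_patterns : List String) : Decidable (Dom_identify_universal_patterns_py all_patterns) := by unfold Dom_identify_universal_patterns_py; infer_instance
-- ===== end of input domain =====

-- B inverts A's loop nesting: one pass over the patterns with a per-theme count table,
-- lowercasing each pattern once, instead of eight separate scans of the pattern list.

-- ===== PORT A =====
def pyThemesA : List String :=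
  ["optimization", "information processing", "self-organization", "adaptation",
   "feedback loops", "emergence", "network effects", "hierarchical organization"]

def identify_universal_patterns_py (all_patterns : List String) : List String :=
  pyThemesA.foldl (fun acc theme =>
    if 2 < ((all_patterns.filter
        (fun p => PySem.Str.isIn (PySem.Str.lower theme) (PySem.Str.lower p))).length : Int)
    then acc ++ ["Universal " ++ theme ++ " across scales"]
    else acc) []

-- ===== PORT B =====
def themesB : List String :=
  ["optimization", "information processing", "self-organization", "adaptation",
   "feedback loops", "emergence", "network effects", "hierarchical organization"]

-- one step of the pattern loop: bump the count of every theme occurring in the lowered pattern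
def stepB (lowth : List String) (counts : List Int) (pl : String) : List Int :=
  List.zipWith (fun tl c => if PySem.Str.isIn tl pl then c + 1 else c) lowth counts

def identify_universal_patterns_py_alt (all_patterns : List String) : List String :=
  ((themesB.zip
      (all_patterns.foldl
        (fun cs p => stepB (themesB.map PySem.Str.lower) cs (PySem.Str.lower p))
        (themesB.map (fun _ => (0 : Int))))).filter (fun tc => 2 < tc.2)).map
    (fun tc => "Universal " ++ tc.1 ++ " across scales")

-- ===== PRECONDITION & SPEC =====
def Spec_identify_universal_patterns_py (all_patterns : List String) (out : List String) : Prop := out = identify_universal_patterns_py_alt all_patterns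
instance (all_patterns : List String) (out : List String) : Decidable (Spec_identify_universal_patterns_py all_patterns out) := by unfold Spec_identify_universal_patterns_py; infer_instance

-- ===== CLAIM (what is proved, stated in full; the proofs are below) =====
def Claim_equal_identify_universal_patterns_py : Prop := ∀ (all_patterns : List String), Dom_identify_universal_patterns_py all_patterns → Spec_identify_universal_patterns_py all_patterns (identify_universal_patterns_py all_patterns)

-- ===== LEMMAS AND PROOFS =====

theorem zipWith_map_self {α β : Type} (g : α → β → β) (f : α → β) (l : List α) :
    List.zipWith g l (l.map f) = l.map (fun x => g x (f x)) := by
  induction l with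
  | nil => rfl
  | cons a t ih => simp [ih]

theorem zip_map_self {α β : Type} (f : α → β) (l : List α) :
    l.zip (l.map f) = l.map (fun x => (x, f x)) := by
  induction l with
  | nil => rfl
  | cons a t ih => simp [ih]

theorem foldl_append_if_map {α β : Type} (p : α → Prop) [DecidablePred p] (f : α → β)
    (l : List α) (init : List β) :
    l.foldl (fun acc x => if p x then acc ++ [f x] else acc) init
      = init ++ (l.filter (fun x => decide (p x))).map f := by
  induction l generalizing init with
  | nil => simp
  | cons a t ih =>
    by_cases h : p a <;> simp [h, ih, List.append_assoc]

-- invariant of B's pattern loop: the count table is the per-theme countP of the patterns seen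
theorem counts_inv (ps : List String) (lowth : List String) (f : String → Int) :
    ps.foldl (fun cs p => stepB lowth cs (PySem.Str.lower p)) (lowth.map f)
      = lowth.map (fun tl =>
          f tl + (ps.countP (fun p => PySem.Str.isIn tl (PySem.Str.lower p)) : Int)) := by
  induction ps generalizing f with
  | nil => simp
  | cons p ps ih =>
    rw [List.foldl_cons]
    have h1 : stepB lowth (lowth.map f) (PySem.Str.lower p)
        = lowth.map (fun x => if PySem.Str.isIn x (PySem.Str.lower p) then f x + 1 else f x) := by
      simp [stepB, zipWith_map_self]
    rw [h1, ih]
    apply List.map_congr_left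
    intro tl _
    rw [List.countP_cons]
    by_cases h : PySem.Str.isIn tl (PySem.Str.lower p) = true <;>
      simp only [h, if_true, if_false, Bool.false_eq_true] <;> push_cast <;> ring

-- ===== VERDICT (by name: the statement is the Claim_ definition above) =====
theorem identify_universal_patterns_py_spec : Claim_equal_identify_universal_patterns_py := by
  intro all_patterns _
  unfold Spec_identify_universal_patterns_py identify_universal_patterns_py
    identify_universal_patterns_py_alt
  rw [show pyThemesA = themesB from rfl, foldl_append_if_map]
  have hinit : themesB.map (fun _ => (0 : Int))
      = (themesB.map PySem.Str.lower).map (fun _ => (0 : Int)) := by decide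
  rw [hinit, counts_inv, List.map_map, zip_map_self, List.filter_map, List.map_map,
    List.nil_append]
  apply congrArg
  apply List.filter_congr
  intro t _
  simp [List.countP_eq_length_filter]
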